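-- pv_equiv track=rewrite | github.com/MrBrantCode/unitest_baseline | mut_generate/mist_train_cf/cf_96384/solution.py | replace_keyword
-- ===== SOURCE A (Python) =====
-- def replace_keyword(string, keyword, replacement):
--     count = 0
--     i = 0
--     while i < len(string):
--         if string[i:i+len(keyword)] == keyword:
--             # Check if the keyword is part of another word
--             if (i > 0 and string[i-1].isalpha()) or (i+len(keyword) < len(string) and string[i+len(keyword)].isalpha()):
--                 i += 1
--                 continue
--             # Replace the keyword with the replacement word
--             string = string[:i] + replacement + string[i+len(keyword):]
--             count += 1
--             i += len(replacement)
--         else: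
--             i += 1
--     return count, string
-- ===== SOURCE B (Python) =====
-- def replace_keyword(string, keyword, replacement):
--     n, k = len(string), len(keyword)
--     parts = []
--     count = 0
--     j = 0
--     last = ''  # last character of the output built so far ('' if none)
--     while True:
--         p = string.find(keyword, j)
--         if p < 0:
--             parts.append(string[j:])
--             break
--         parts.append(string[j:p])
--         if p > j:
--             last = string[p - 1]
--         left_bad = last != '' and last.isalpha()
--         right_bad = p + k < n and string[p + k].isalpha()
--         if left_bad or right_bad:
--             parts.append(string[p])
--             last = string[p]
--             j = p + 1
--         else:
--             parts.append(replacement)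
--             count += 1
--             if replacement:
--                 last = replacement[-1]
--             j = p + k
--     return count, ''.join(parts)
-- ===== Notes on version B (the rewrite author's own statement) =====
-- stated objective: faster
-- what changed: B replaces A's index-by-index rescan of a repeatedly rebuilt string with a single pass over the original string that jumps between candidate occurrences via str.find, tracks the last emitted character for the left-boundary test, and joins the collected pieces once at the end; Pre_ excludes the empty keyword, on which A loops forever for most replacements and B's find loop raises or loops rather than returning.
-- outside the precondition, e.g. on replace_keyword('..', '', 'x'): A returns (2, 'x.x.'), B raises IndexError
import Mathlib
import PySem

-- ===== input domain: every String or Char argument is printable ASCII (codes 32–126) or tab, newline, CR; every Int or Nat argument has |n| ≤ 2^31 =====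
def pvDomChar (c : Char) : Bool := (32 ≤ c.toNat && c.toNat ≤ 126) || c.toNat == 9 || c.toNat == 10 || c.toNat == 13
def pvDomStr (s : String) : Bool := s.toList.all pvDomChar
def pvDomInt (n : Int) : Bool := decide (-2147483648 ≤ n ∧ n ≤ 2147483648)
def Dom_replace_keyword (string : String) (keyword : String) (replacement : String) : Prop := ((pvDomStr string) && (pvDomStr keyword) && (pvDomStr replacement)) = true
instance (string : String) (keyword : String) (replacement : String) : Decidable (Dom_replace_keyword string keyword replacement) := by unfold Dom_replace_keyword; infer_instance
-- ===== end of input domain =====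

-- B rebuilds the result in one pass over the ORIGINAL string, jumping between
-- candidate occurrences with find instead of re-slicing a mutated string at
-- every index (objective: a different, faster traversal). A rebinds its local
-- `string` variable; neither program mutates a caller-visible argument.

-- ===== PORT A =====
-- A's while-loop over the (re-assigned) string, as fuel recursion; the fuel
-- 2*len+1 is sufficient on every input with a nonempty keyword (each step
-- either advances i or shortens the string). string[i:i+k] with 0 ≤ i is
-- (s.drop i).take k; string[:i] / string[i+k:] are take/drop; s.getD is exact
-- because each access is guarded exactly as in the Python source.
def aGo (kw repl : List Char) : Nat → Int → List Char → Nat → Int × List Char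
  | 0, count, s, _ => (count, s)
  | fuel+1, count, s, i =>
    if i < s.length then
      if (s.drop i).take kw.length = kw then
        if (decide (0 < i) && PySem.Chars.isalpha (s.getD (i-1) ' '))
            || (decide (i + kw.length < s.length) && PySem.Chars.isalpha (s.getD (i + kw.length) ' ')) then
          aGo kw repl fuel count s (i+1)
        else
          aGo kw repl fuel (count+1) (s.take i ++ repl ++ s.drop (i + kw.length)) (i + repl.length)
      else
        aGo kw repl fuel count s (i+1)
    else
      (count, s)

def replace_keyword (string : String) (keyword : String) (replacement : String) : Int × String :=
  ((aGo keyword.toList replacement.toList (2 * string.toList.length + 1) 0 string.toList 0).1,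
   String.ofList (aGo keyword.toList replacement.toList (2 * string.toList.length + 1) 0 string.toList 0).2)

-- ===== PORT B =====
-- Source B's find-based while-loop; j strictly increases when the keyword is
-- nonempty, so fuel n+1 always suffices; ''.join(parts) is the flatten at the
-- two exits. `last` is the one-or-zero-character Python string variable.
def bGo (s kw repl : List Char) (n : Nat) : Nat → Int → Nat → List Char → List (List Char) → Int × List Char
  | 0, count, j, _, parts => (count, (parts ++ [s.drop j]).flatten)
  | fuel+1, count, j, last, parts =>
    let p := PySem.Chars.findFrom s kw (j : Int) none
    if p < 0 then
      (count, (parts ++ [s.drop j]).flatten)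
    else
      let pn := p.toNat
      let parts₁ := parts ++ [(s.drop j).take (pn - j)]      -- string[j:p]
      let last₁ := if j < pn then [s.getD (pn - 1) ' '] else last
      let leftBad := !last₁.isEmpty && PySem.Chars.strIsalpha last₁
      let rightBad := decide (pn + kw.length < n) && PySem.Chars.isalpha (s.getD (pn + kw.length) ' ')
      if leftBad || rightBad then
        bGo s kw repl n fuel count (pn + 1) [s.getD pn ' '] (parts₁ ++ [[s.getD pn ' ']])
      else
        bGo s kw repl n fuel (count + 1) (pn + kw.length)
          (match repl.getLast? with | some c => [c] | none => last₁)
          (parts₁ ++ [repl])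

def replace_keyword_alt (string : String) (keyword : String) (replacement : String) : Int × String :=
  ((bGo string.toList keyword.toList replacement.toList string.toList.length
      (string.toList.length + 1) 0 0 [] []).1,
   String.ofList (bGo string.toList keyword.toList replacement.toList string.toList.length
      (string.toList.length + 1) 0 0 [] []).2)

-- ===== PRECONDITION & SPEC =====
-- Pre_ excludes exactly the empty keyword: there A's scan over its own
-- inserted text loops forever for most replacements (e.g. an empty one) and,
-- where it does return, its insertion pattern is an artefact of rescanning the
-- mutated string, while B's find loop raises or loops rather than returning.
def Pre_replace_keyword (string : String) (keyword : String) (replacement : String) : Prop :=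
  keyword.toList ≠ []

instance (string : String) (keyword : String) (replacement : String) : Decidable (Pre_replace_keyword string keyword replacement) := by
  unfold Pre_replace_keyword; infer_instance

def pvWitness_replace_keyword : String × String × String := ("hello world", "world", "there")

def Spec_replace_keyword (string : String) (keyword : String) (replacement : String) (out : Int × String) : Prop := out = replace_keyword_alt string keyword replacement
instance (string : String) (keyword : String) (replacement : String) (out : Int × String) : Decidable (Spec_replace_keyword string keyword replacement out) := by unfold Spec_replace_keyword; infer_instance

-- ===== CLAIM (what is proved, stated in full; the proofs are below) =====
def Claim_equal_replace_keyword : Prop := ∀ (string : String) (keyword : String) (replacement : String), Dom_replace_keyword string keyword replacement → Pre_replace_keyword string keyword replacement → Spec_replace_keyword string keyword replacement (replace_keyword string keyword replacement)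

-- ===== LEMMAS AND PROOFS =====

-- last character of the output built so far, as a Python string ('' if none)
def lastStr (l : List Char) : List Char :=
  match l.getLast? with
  | some c => [c]
  | none => []

lemma take_eq_iff_prefix (kw l : List Char) : (l.take kw.length = kw) ↔ kw <+: l := by
  rw [List.prefix_iff_eq_take]; constructor <;> intro h <;> exact h.symm

lemma lastStr_concat (l : List Char) (c : Char) : lastStr (l ++ [c]) = [c] := by simp [lastStr]

lemma lastStr_append_ne (l r : List Char) (h : r ≠ []) : lastStr (l ++ r) = lastStr r := by
  simp [lastStr, List.getLast?_append_of_ne_nil _ h]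

lemma left_eq (out rest : List Char) :
    ((decide (0 < out.length) && PySem.Chars.isalpha ((out ++ rest).getD (out.length - 1) ' ')))
    = (!(lastStr out).isEmpty && PySem.Chars.strIsalpha (lastStr out)) := by
  rcases List.eq_nil_or_concat out with rfl | ⟨l, c, hout⟩
  · simp [lastStr]
  · rw [List.concat_eq_append] at hout
    subst hout
    have h1 : (l ++ [c] ++ rest).getD ((l ++ [c]).length - 1) ' ' = c := by
      rw [List.append_assoc]
      simp only [List.length_append, List.length_cons, List.length_nil, Nat.add_sub_cancel]
      rw [List.getD_append_right l ([c] ++ rest) ' ' l.length (le_refl _)]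
      simp
    rw [h1, lastStr_concat]
    simp [PySem.Chars.strIsalpha]

lemma aGo_skip (kw repl : List Char) :
    ∀ (m f : Nat) (count : Int) (out rest : List Char),
      m ≤ rest.length → (∀ d < m, ¬ kw <+: rest.drop d) →
      aGo kw repl (m + f) count (out ++ rest) out.length
        = aGo kw repl f count (out ++ rest) (out.length + m) := by
  intro m
  induction m with
  | zero => intro f count out rest _ _; simp
  | succ m ih =>
    intro f count out rest hm hnm
    rcases rest with _ | ⟨c, rest'⟩
    · simp at hm
    have h0 : ¬ kw <+: (c :: rest') := by simpa using hnm 0 (by omega)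
    have hfuel : m + 1 + f = (m + f) + 1 := by omega
    rw [hfuel, aGo]
    have hlt : out.length < (out ++ c :: rest').length := by simp
    rw [if_pos hlt]
    have hdrop : (out ++ c :: rest').drop out.length = c :: rest' := by simp
    have hmatch : ¬ ((out ++ c :: rest').drop out.length).take kw.length = kw := by
      rw [hdrop, take_eq_iff_prefix]; exact h0
    rw [if_neg hmatch]
    have hre : out ++ c :: rest' = (out ++ [c]) ++ rest' := by simp
    have hlen : out.length + 1 = (out ++ [c]).length := by simp
    rw [hre, hlen]
    rw [ih f count (out ++ [c]) rest' (by simpa using hm)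
      (fun d hd => by simpa using hnm (d+1) (by omega))]
    congr 1
    simp; omega

-- no-occurrence tail: A skips to the end and returns

lemma aGo_end (kw repl : List Char)
    (rest out : List Char) (count : Int) (f : Nat)
    (hno : ¬ kw <:+: rest) :
    aGo kw repl (rest.length + 1 + f) count (out ++ rest) out.length = (count, out ++ rest) := by
  have hnm : ∀ d < rest.length, ¬ kw <+: rest.drop d := by
    intro d _ hpre
    exact hno (hpre.isInfix.trans (List.drop_suffix d rest).isInfix)
  have := aGo_skip kw repl rest.length (f + 1) count out rest (le_refl _) hnm
  rw [show rest.length + 1 + f = rest.length + (f + 1) by omega]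
  rw [this, aGo]
  rw [if_neg (by simp)]

lemma bMain (s kw repl : List Char) (hkw : kw ≠ []) :
    ∀ (m j : Nat) (count : Int) (out : List Char) (parts : List (List Char)) (fA fB : Nat),
      j + m = s.length →
      parts.flatten = out →
      m + 1 ≤ fB → m + 1 ≤ fA →
      aGo kw repl fA count (out ++ s.drop j) out.length
        = bGo s kw repl s.length fB count j (lastStr out) parts := by
  intro m
  induction m using Nat.strong_induction_on with
  | _ m ih =>
    intro j count out parts fA fB hj hflat hfB hfA
    obtain ⟨fB', rfl⟩ : ∃ fB', fB = fB' + 1 := ⟨fB - 1, by omega⟩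
    rw [bGo]
    have hjle : j ≤ s.length := by omega
    rw [PySem.Chars.findFrom_natCast s kw j hjle]
    have hmlen : (s.drop j).length = m := by simp; omega
    by_cases hq1 : PySem.Chars.find (s.drop j) kw = -1
    · -- no further occurrence: A skips to the end
      rw [if_pos hq1]
      rw [if_pos (by norm_num)]
      have hno : ¬ kw <:+: s.drop j := (PySem.Chars.find_eq_neg_one_iff _ _).mp hq1
      have hfa : fA = (s.drop j).length + 1 + (fA - m - 1) := by omega
      rw [hfa, aGo_end kw repl (s.drop j) out count _ hno]
      simp [hflat]
    · -- next occurrence at j + d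
      set q := PySem.Chars.find (s.drop j) kw with hq
      have hq0 : 0 ≤ q := by
        have := PySem.Chars.neg_one_le_find (s.drop j) kw
        rw [← hq] at this
        omega
      rw [if_neg hq1]
      rw [if_neg (by omega)]
      set d := q.toNat with hd
      have hpn : ((j : Int) + q).toNat = j + d := by omega
      rw [hpn]
      obtain ⟨hpre, hmin⟩ := PySem.Chars.find_spec (s := s.drop j) (sub := kw) (by rw [← hq]; omega)
      rw [← hq] at hpre hmin
      have hdle : d ≤ m := by
        have := PySem.Chars.find_le_length (s.drop j) kw
        rw [← hq] at this; omega
      have hkpos : 0 < kw.length := List.length_pos_iff.mpr hkw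
      have hdd : (s.drop j).drop d = s.drop (j + d) := by
        rw [List.drop_drop]
      have hpre' : kw <+: s.drop (j + d) := hdd ▸ hpre
      have hklen : kw.length ≤ s.length - (j + d) := by
        have h1 := hpre'.length_le
        simp at h1
        omega
      have hjd_lt : j + d < s.length := by omega
      set rest' := s.drop (j + d) with hrest'
      set out' := out ++ (s.drop j).take d with hout'
      have hlenout' : out'.length = out.length + d := by
        rw [hout', List.length_append, List.length_take, hmlen]
        omega
      have hsplit : out ++ s.drop j = out' ++ rest' := by
        rw [hout', List.append_assoc, ← hdd, List.take_append_drop]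
      have hrlen : rest'.length = s.length - (j + d) := by
        rw [hrest', List.length_drop]
      -- A: skip the d non-matching positions
      have hfa2 : fA = d + (fA - d) := by omega
      rw [hfa2, aGo_skip kw repl d (fA - d) count out (s.drop j) (by omega)
        (fun t ht => hmin t (by omega))]
      obtain ⟨g, hg⟩ : ∃ g, fA - d = g + 1 := ⟨fA - d - 1, by omega⟩
      rw [hg, hsplit, show out.length + d = out'.length from hlenout'.symm, aGo]
      rw [if_pos (by simp only [List.length_append]; omega)]
      have hdropA : (out' ++ rest').drop out'.length = rest' := by simp
      rw [hdropA, if_pos ((take_eq_iff_prefix kw rest').mpr hpre')]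
      -- the two boundary conditions are the same boolean
      have hlast : (if j < j + d then [s.getD (j + d - 1) ' '] else lastStr out) = lastStr out' := by
        rcases Nat.eq_zero_or_pos d with hd0 | hd0
        · rw [hout']
          simp [hd0]
        · rw [if_pos (by omega), hout']
          obtain ⟨e, he⟩ : ∃ e, d = e + 1 := ⟨d - 1, by omega⟩
          have helt : e < (s.drop j).length := by omega
          have htake : (s.drop j).take d = (s.drop j).take e ++ [(s.drop j)[e]] := by
            rw [he, List.take_add_one]
            simp [List.getElem?_eq_getElem helt]
          rw [htake, ← List.append_assoc, lastStr_concat]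
          have h2 : (s.drop j)[e] = s[j + e]'(by omega) := List.getElem_drop
          have h3 : s.getD (j + d - 1) ' ' = s[j + e]'(by omega) := by
            rw [show j + d - 1 = j + e by omega, List.getD_eq_getElem s ' ' (by omega)]
          rw [h2, h3]
      rw [left_eq out' rest']
      have hcondR1 : decide (out'.length + kw.length < (out' ++ rest').length)
          = decide (j + d + kw.length < s.length) := by
        apply decide_eq_decide.mpr
        simp only [List.length_append]
        omega
      have hcondR2 : (out' ++ rest').getD (out'.length + kw.length) ' '
          = s.getD (j + d + kw.length) ' ' := by
        rw [List.getD_append_right _ _ _ _ (by omega),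
          show out'.length + kw.length - out'.length = kw.length by omega, hrest']
        simp [List.getD_eq_getElem?_getD, List.getElem?_drop]
      rw [hcondR1, hcondR2]
      simp only [Nat.add_sub_cancel_left, hlast]
      -- both sides now branch on the same condition
      by_cases hcb : (!(lastStr out').isEmpty && PySem.Chars.strIsalpha (lastStr out')
          || decide (j + d + kw.length < s.length)
            && PySem.Chars.isalpha (s.getD (j + d + kw.length) ' ')) = true
      · rw [if_pos hcb, if_pos hcb]
        -- rejected occurrence: both copy the single character s[j+d]
        have hgd : s.getD (j + d) ' ' = s[j + d] := List.getD_eq_getElem s ' ' hjd_lt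
        have hconsr : rest' = s[j + d] :: s.drop (j + d + 1) := by
          rw [hrest']
          exact List.drop_eq_getElem_cons hjd_lt
        have hre2 : out' ++ rest' = (out' ++ [s[j + d]]) ++ s.drop (j + d + 1) := by
          rw [hconsr]; simp
        have hre3 : out'.length + 1 = (out' ++ [s[j + d]]).length := by simp
        rw [hre2, hre3, hgd]
        have := ih (s.length - (j + d + 1)) (by omega) (j + d + 1) count
          (out' ++ [s[j + d]]) ((parts ++ [(s.drop j).take d]) ++ [[s[j + d]]]) g fB'
          (by omega)
          (by simp [hflat, hout'])
          (by omega) (by omega)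
        rw [lastStr_concat] at this
        exact this
      · rw [if_neg hcb, if_neg hcb]
        -- accepted occurrence: splice in the replacement
        have htk : (out' ++ rest').take out'.length = out' := List.take_left
        have hdr : (out' ++ rest').drop (out'.length + kw.length) = s.drop (j + d + kw.length) := by
          rw [List.drop_length_add_append, hrest', List.drop_drop]
        have hlen3 : out'.length + repl.length = (out' ++ repl).length := by simp
        rw [htk, hdr, hlen3]
        have hlast3 : (match repl.getLast? with
            | some c => ([c] : List Char)
            | none => lastStr out') = lastStr (out' ++ repl) := by
          cases hr : repl.getLast? with
          | none =>
            rw [List.getLast?_eq_none_iff.mp hr, List.append_nil]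
          | some c =>
            have hrepl_ne : repl ≠ [] := by
              intro hh
              rw [hh] at hr
              simp at hr
            rw [lastStr_append_ne out' repl hrepl_ne]
            simp [lastStr, hr]
        rw [hlast3]
        exact ih (s.length - (j + d + kw.length)) (by omega) (j + d + kw.length) (count + 1)
          (out' ++ repl) ((parts ++ [(s.drop j).take d]) ++ [repl]) g fB'
          (by omega)
          (by simp [hflat, hout'])
          (by omega) (by omega)

-- ===== VERDICT (by name: the statement is the Claim_ definition above) =====
theorem replace_keyword_spec : Claim_equal_replace_keyword := by
  unfold Claim_equal_replace_keyword
  intro string keyword replacement _ hpre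
  unfold Spec_replace_keyword replace_keyword replace_keyword_alt
  unfold Pre_replace_keyword at hpre
  have hb := bMain string.toList keyword.toList replacement.toList hpre
    string.toList.length 0 0 [] [] (2 * string.toList.length + 1)
    (string.toList.length + 1) (by omega) rfl (by omega) (by omega)
  simp only [List.nil_append, List.drop_zero, List.length_nil, show lastStr [] = [] from rfl] at hb
  rw [hb]
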